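-- pv_equiv track=rewrite | github.com/AliaumeL/polyregular-model-checking | paper/programs/eq_from_idxc_bools.py | eq
-- ===== SOURCE A (Python) =====
-- def first_or_second(x : bool, l1 : list[chr], l2 : list[chr]) -> list[chr]:
--     if x:
--         return l1
--     else:
--         return l2
--
-- def eq(x : list[chr], y : list[chr]) -> bool :
--     b = False
--     for (i, vx) in enumerate(first_or_second(b, x, y)):
--         b = True
--         for (j, vy) in enumerate(first_or_second(b, x, y)):
--             if i == j and ((vx == 'a' and vy != 'a') or (vx == 'b' and vy != 'b')):
--                     return False
--     return True
-- ===== SOURCE B (Python) =====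
-- def eq(x, y):
--     # single pass over the common prefix: A's nested loops only ever act at equal indices,
--     # with the outer loop reading y and the inner loop reading x.
--     for xv, yv in zip(x, y):
--         if yv in ('a', 'b') and xv != yv:
--             return False
--     return True
-- ===== Notes on version B (the rewrite author's own statement) =====
-- stated objective: faster
-- what changed: Replaced A's nested enumerate loops (inner full scan of x per element of y looking for the matching index) by a single zip pass comparing the elements at each common index.
import Mathlib
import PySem

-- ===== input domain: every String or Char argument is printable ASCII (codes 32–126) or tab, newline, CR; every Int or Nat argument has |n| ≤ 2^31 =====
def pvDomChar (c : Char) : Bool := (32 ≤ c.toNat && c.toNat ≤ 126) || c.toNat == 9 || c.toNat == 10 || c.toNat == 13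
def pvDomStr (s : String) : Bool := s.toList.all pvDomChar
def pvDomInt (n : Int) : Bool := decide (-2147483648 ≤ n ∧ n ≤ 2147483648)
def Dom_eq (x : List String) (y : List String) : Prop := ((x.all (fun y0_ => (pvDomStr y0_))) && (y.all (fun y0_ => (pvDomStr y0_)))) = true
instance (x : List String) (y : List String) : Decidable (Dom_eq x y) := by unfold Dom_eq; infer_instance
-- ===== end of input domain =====

-- B replaces A's nested enumerate loops by a single pass over the common prefix (faster in a timing run).

-- ===== PORT A =====
-- inner 'for (j, vy) in enumerate(first_or_second(True, x, y))' body with early return False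
def eqInner (i : Int) (vx : String) : List (Int × String) → Bool
  | [] => true
  | (j, vy) :: rest =>
      if i = j ∧ ((vx = "a" ∧ vy ≠ "a") ∨ (vx = "b" ∧ vy ≠ "b")) then false
      else eqInner i vx rest

-- outer 'for (i, vx) in enumerate(first_or_second(False, x, y))' loop
def eqOuter (x : List String) : List (Int × String) → Bool
  | [] => true
  | (i, vx) :: rest =>
      if eqInner i vx (PySem.List.enumerate x 0) then eqOuter x rest else false

def eq (x : List String) (y : List String) : Bool :=
  eqOuter x (PySem.List.enumerate y 0)

-- ===== PORT B =====
def eq_alt (x : List String) (y : List String) : Bool :=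
  match x, y with
  | _, [] => true
  | [], _ :: _ => true
  | xv :: xs, yv :: ys =>
      if (yv = "a" ∨ yv = "b") ∧ xv ≠ yv then false else eq_alt xs ys

-- ===== PRECONDITION & SPEC =====
def Spec_eq (x : List String) (y : List String) (out : Bool) : Prop := out = eq_alt x y
instance (x : List String) (y : List String) (out : Bool) : Decidable (Spec_eq x y out) := by unfold Spec_eq; infer_instance

-- ===== CLAIM (what is proved, stated in full; the proofs are below) =====
def Claim_equal_eq : Prop := ∀ (x : List String) (y : List String), Dom_eq x y → Spec_eq x y (eq x y)

-- ===== LEMMAS AND PROOFS =====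

-- the inner loop never fires when the sought index is below every index in the enumeration
theorem eqInner_lt (xs : List String) (vx : String) (s i : Int) (h : i < s) :
    eqInner i vx (PySem.List.enumerate xs s) = true := by
  induction xs generalizing s with
  | nil => simp [PySem.List.enumerate_nil, eqInner]
  | cons v xs ih =>
      rw [PySem.List.enumerate_cons, eqInner]
      have hne : ¬ (i = s ∧ ((vx = "a" ∧ v ≠ "a") ∨ (vx = "b" ∧ v ≠ "b"))) := by
        rintro ⟨rfl, -⟩; omega
      rw [if_neg hne]
      exact ih (s + 1) (by omega)

-- the inner loop checks exactly the x-entry at the sought index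
theorem eqInner_enumerate (xs : List String) (s : Int) (n : Nat) (vx : String) :
    eqInner (s + n) vx (PySem.List.enumerate xs s) =
      match xs[n]? with
      | none => true
      | some vy => if (vx = "a" ∧ vy ≠ "a") ∨ (vx = "b" ∧ vy ≠ "b") then false else true := by
  induction xs generalizing s n with
  | nil => simp [PySem.List.enumerate_nil, eqInner]
  | cons v xs ih =>
      rw [PySem.List.enumerate_cons, eqInner]
      cases n with
      | zero =>
          simp only [Nat.cast_zero, add_zero, List.getElem?_cons_zero]
          by_cases hb : (vx = "a" ∧ v ≠ "a") ∨ (vx = "b" ∧ v ≠ "b")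
          · simp [hb]
          · simp [hb, eqInner_lt xs vx (s + 1) s (by omega)]
      | succ m =>
          have hne : ¬ ((s + (↑(m + 1) : Int)) = s ∧ ((vx = "a" ∧ v ≠ "a") ∨ (vx = "b" ∧ v ≠ "b"))) := by
            rintro ⟨h, -⟩; omega
          rw [if_neg hne]
          have : (s + (↑(m + 1) : Int)) = (s + 1) + (↑m : Int) := by push_cast; ring
          rw [this, ih (s + 1) m]
          simp

-- the outer loop from start n equals B's single pass on x with its first n entries dropped
theorem eqOuter_enumerate (y x : List String) (n : Nat) :
    eqOuter x (PySem.List.enumerate y (n : Int)) = eq_alt (x.drop n) y := by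
  induction y generalizing n with
  | nil =>
      rw [PySem.List.enumerate_nil, eqOuter]
      cases h : x.drop n with
      | nil => rw [eq_alt]
      | cons a l => rw [eq_alt]
  | cons v ys ih =>
      rw [PySem.List.enumerate_cons, eqOuter]
      have hinner := eqInner_enumerate x 0 n v
      rw [zero_add] at hinner
      rw [hinner]
      cases hx : x[n]? with
      | none =>
          have hlen : x.length ≤ n := List.getElem?_eq_none_iff.mp hx
          have hd : x.drop n = [] := List.drop_eq_nil_of_le hlen
          have hd' : x.drop (n + 1) = [] := List.drop_eq_nil_of_le (by omega)
          dsimp only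
          have hcast : ((n : Int) + 1) = ((n + 1 : Nat) : Int) := by push_cast; ring
          rw [if_pos rfl, hcast, ih (n + 1), hd, hd']
          cases ys with
          | nil => rw [eq_alt, eq_alt]
          | cons b l => rw [eq_alt, eq_alt]
      | some xv =>
          obtain ⟨hn, hget⟩ := List.getElem?_eq_some_iff.mp hx
          dsimp only
          have hd : x.drop n = xv :: x.drop (n + 1) := by
            rw [← hget]; exact (List.getElem_cons_drop hn).symm
          rw [hd, eq_alt]
          have hiff : ((v = "a" ∧ xv ≠ "a") ∨ (v = "b" ∧ xv ≠ "b")) ↔ ((v = "a" ∨ v = "b") ∧ xv ≠ v) := by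
            constructor
            · rintro (⟨rfl, h⟩ | ⟨rfl, h⟩)
              · exact ⟨Or.inl rfl, h⟩
              · exact ⟨Or.inr rfl, h⟩
            · rintro ⟨(rfl | rfl), h⟩
              · exact Or.inl ⟨rfl, h⟩
              · exact Or.inr ⟨rfl, h⟩
          by_cases hb : (v = "a" ∨ v = "b") ∧ xv ≠ v
          · simp [hiff.mpr hb, hb]
          · have hb' : ¬ ((v = "a" ∧ xv ≠ "a") ∨ (v = "b" ∧ xv ≠ "b")) := fun h => hb (hiff.mp h)
            simp only [if_neg hb', if_neg hb]
            have hcast : ((n : Int) + 1) = ((n + 1 : Nat) : Int) := by push_cast; ring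
            rw [hcast, ih (n + 1)]
            simp

-- ===== VERDICT (by name: the statement is the Claim_ definition above) =====
theorem eq_spec : Claim_equal_eq := by
  intro x y _
  unfold Spec_eq eq
  have := eqOuter_enumerate y x 0
  rw [Nat.cast_zero] at this
  rw [this, List.drop_zero]
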